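-- pv_equiv track=rewrite | github.com/AbhijeetVighne/geektrust | geektrust.py | priceCalculationForGuest
-- ===== SOURCE A (Python) =====
-- def priceCalculationForGuest(guest_Water_Requirement):
--     price = 0
--     for i in range(1,1000):
--         if i==1:
--             if guest_Water_Requirement < 500:
--                 price = guest_Water_Requirement * 2
--                 return price
--             else:
--                 price += 500*2
--                 guest_Water_Requirement = guest_Water_Requirement - 500
--
--         elif i == 2:
--             if guest_Water_Requirement < 1000:
--                 price += guest_Water_Requirement * 3
--                 return price
--             else:
--                 price += 1000*3
--                 guest_Water_Requirement = guest_Water_Requirement -1000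
--
--         elif i == 3:
--             if guest_Water_Requirement < 1500:
--                 price += guest_Water_Requirement * 5
--                 return price
--             price += 1500*5
--             guest_Water_Requirement = guest_Water_Requirement - 1500
--
--         else:
--             price += guest_Water_Requirement * 8
--             return price
-- ===== SOURCE B (Python) =====
-- def priceCalculationForGuest(guest_Water_Requirement):
--     # Branchless closed form: a base per-litre rate plus marginal per-litre
--     # surcharges beyond each cumulative breakpoint where the tier rate rises.
--     w = guest_Water_Requirement
--     return 2 * w + max(0, w - 500) + 2 * max(0, w - 1500) + 3 * max(0, w - 3000)
-- ===== Notes on version B (the rewrite author's own statement) =====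
-- stated objective: simpler
-- what changed: Replaces A's counter loop with tier dispatch and early returns by a single branchless closed-form expression: a base per-litre rate plus marginal max-of-zero per-litre surcharges beyond each cumulative breakpoint where the tier rate rises.
import Mathlib
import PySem

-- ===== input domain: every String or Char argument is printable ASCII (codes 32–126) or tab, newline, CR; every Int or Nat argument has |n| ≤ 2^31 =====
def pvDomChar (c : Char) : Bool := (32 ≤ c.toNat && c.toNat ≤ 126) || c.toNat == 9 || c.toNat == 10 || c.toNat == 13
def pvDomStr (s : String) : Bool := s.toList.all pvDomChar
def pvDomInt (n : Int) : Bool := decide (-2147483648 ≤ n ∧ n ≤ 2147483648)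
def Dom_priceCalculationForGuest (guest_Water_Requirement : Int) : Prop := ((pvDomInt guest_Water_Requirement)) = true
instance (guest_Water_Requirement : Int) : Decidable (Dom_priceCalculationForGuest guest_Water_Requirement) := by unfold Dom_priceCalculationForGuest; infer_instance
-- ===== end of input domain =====

-- B replaces A's range(1,1000) counter loop with tier dispatch by one branchless closed-form arithmetic expression; same values, simpler.
-- ===== PORT A =====
-- the body of A's `for i in range(1,1000)` loop, with early `return` realised by stopping the recursion;
-- the empty-list case mirrors Python's fall-off (unreachable: the i=4 branch always returns).
def pvLoopA : List Int → Int → Int → Int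
  | [], price, _ => price
  | i :: rest, price, w =>
    if i == 1 then
      (if w < 500 then w * 2
       else pvLoopA rest (price + 500 * 2) (w - 500))
    else if i == 2 then
      (if w < 1000 then price + w * 3
       else pvLoopA rest (price + 1000 * 3) (w - 1000))
    else if i == 3 then
      (if w < 1500 then price + w * 5
       else pvLoopA rest (price + 1500 * 5) (w - 1500))
    else price + w * 8

def priceCalculationForGuest (guest_Water_Requirement : Int) : Int :=
  pvLoopA (PySem.List.pyRange 1 1000 1) 0 guest_Water_Requirement

-- ===== PORT B =====
-- branchless closed form: base rate 2 per litre plus marginal surcharges at cumulative breakpoints 500/1500/3000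
def priceCalculationForGuest_alt (guest_Water_Requirement : Int) : Int :=
  2 * guest_Water_Requirement + max 0 (guest_Water_Requirement - 500)
    + 2 * max 0 (guest_Water_Requirement - 1500) + 3 * max 0 (guest_Water_Requirement - 3000)

-- ===== PRECONDITION & SPEC =====
def Spec_priceCalculationForGuest (guest_Water_Requirement : Int) (out : Int) : Prop := out = priceCalculationForGuest_alt guest_Water_Requirement
instance (guest_Water_Requirement : Int) (out : Int) : Decidable (Spec_priceCalculationForGuest guest_Water_Requirement out) := by unfold Spec_priceCalculationForGuest; infer_instance

-- ===== CLAIM =====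
def Claim_equal_priceCalculationForGuest : Prop := ∀ (guest_Water_Requirement : Int), Dom_priceCalculationForGuest guest_Water_Requirement → Spec_priceCalculationForGuest guest_Water_Requirement (priceCalculationForGuest guest_Water_Requirement)

-- ===== LEMMAS AND PROOFS =====
theorem pyRange_head4 : PySem.List.pyRange 1 1000 1 = 1 :: 2 :: 3 :: 4 :: PySem.List.pyRange 5 1000 1 := by
  rw [PySem.List.pyRange_one_cons (by norm_num), PySem.List.pyRange_one_cons (by norm_num),
      PySem.List.pyRange_one_cons (by norm_num), PySem.List.pyRange_one_cons (by norm_num)]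
  norm_num

theorem stepA1 (t : List Int) (p w : Int) :
    pvLoopA (1 :: t) p w = if w < 500 then w * 2 else pvLoopA t (p + 500 * 2) (w - 500) := rfl
theorem stepA2 (t : List Int) (p w : Int) :
    pvLoopA (2 :: t) p w = if w < 1000 then p + w * 3 else pvLoopA t (p + 1000 * 3) (w - 1000) := rfl
theorem stepA3 (t : List Int) (p w : Int) :
    pvLoopA (3 :: t) p w = if w < 1500 then p + w * 5 else pvLoopA t (p + 1500 * 5) (w - 1500) := rfl
theorem stepA4 (t : List Int) (p w : Int) :
    pvLoopA (4 :: t) p w = p + w * 8 := rfl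

-- ===== VERDICT =====
theorem priceCalculationForGuest_spec : Claim_equal_priceCalculationForGuest := by
  intro w _
  unfold Spec_priceCalculationForGuest priceCalculationForGuest priceCalculationForGuest_alt
  rw [pyRange_head4, stepA1]
  split_ifs with h1
  · omega
  · rw [stepA2]; split_ifs with h2
    · omega
    · rw [stepA3]; split_ifs with h3
      · omega
      · rw [stepA4]; omega
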